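-- pv_equiv track=rewrite | github.com/james5635/GeekForGeek-Data-Structure-and-Algorithm | sorting/medium/three_way_partitioning/solution.py | verify_partition
-- ===== SOURCE A (Python) =====
-- from typing import List
--
-- def verify_partition(arr: List[int], low_val: int, high_val: int) -> bool:
--     """
--     Verify if array is correctly partitioned.
--
--     Args:
--         arr: List to verify
--         low_val: Lower bound
--         high_val: Upper bound
--
--     Returns:
--         True if correctly partitioned
--     """
--     seen_less = True
--     seen_range = False
--     seen_greater = False
--
--     for num in arr:
--         if num < low_val:
--             if seen_range or seen_greater:
--                 return False
--         elif low_val <= num <= high_val: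
--             if seen_greater:
--                 return False
--             seen_range = True
--             seen_less = False
--         else:  # num > high_val
--             seen_greater = True
--             seen_less = False
--             seen_range = True
--
--     return True
-- ===== SOURCE B (Python) =====
-- def verify_partition(arr, low_val, high_val):
--     cats = [0 if x < low_val else (1 if x <= high_val else 2) for x in arr]
--     return all(a <= b for a, b in zip(cats, cats[1:]))
-- ===== Notes on version B (the rewrite author's own statement) =====
-- stated objective: simpler
-- what changed: Replaces A's incremental three-flag state machine with an explicit category list (0/1/2 per element) followed by a single adjacent-pairs monotonicity check.
import Mathlib
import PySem

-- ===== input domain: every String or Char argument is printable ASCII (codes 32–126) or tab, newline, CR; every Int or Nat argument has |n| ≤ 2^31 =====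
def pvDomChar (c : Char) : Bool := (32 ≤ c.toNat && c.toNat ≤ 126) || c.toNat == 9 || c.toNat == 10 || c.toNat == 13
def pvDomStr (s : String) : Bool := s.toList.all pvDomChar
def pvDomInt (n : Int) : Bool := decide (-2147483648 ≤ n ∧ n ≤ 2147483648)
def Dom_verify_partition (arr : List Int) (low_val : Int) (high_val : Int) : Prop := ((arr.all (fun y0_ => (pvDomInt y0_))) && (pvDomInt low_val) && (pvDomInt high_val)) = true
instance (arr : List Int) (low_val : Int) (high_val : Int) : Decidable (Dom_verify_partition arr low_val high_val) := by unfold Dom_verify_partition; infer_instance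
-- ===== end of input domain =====

-- B replaces A's incremental three-flag state machine by mapping each element to a
-- category (0/1/2) and checking the category sequence is non-decreasing (simpler decomposition).


-- ===== PORT A =====
-- A's for-loop over arr carrying the three boolean flags (seen_less, seen_range, seen_greater)
def pvLoopA (low_val high_val : Int) : List Int → Bool → Bool → Bool → Bool
  | [], _, _, _ => true
  | num :: rest, sl, sr, sg =>
    if num < low_val then
      if sr || sg then false else pvLoopA low_val high_val rest sl sr sg
    else if low_val ≤ num ∧ num ≤ high_val then
      if sg then false else pvLoopA low_val high_val rest false true sg
    else
      pvLoopA low_val high_val rest false true true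

def verify_partition (arr : List Int) (low_val : Int) (high_val : Int) : Bool :=
  pvLoopA low_val high_val arr true false false

-- ===== PORT B =====
-- category key: 0 if x < low_val, 1 if low_val <= x <= high_val, else 2
def pvCat (low_val high_val : Int) (x : Int) : Int :=
  if x < low_val then 0 else if x ≤ high_val then 1 else 2

def verify_partition_alt (arr : List Int) (low_val : Int) (high_val : Int) : Bool :=
  let cats := arr.map (pvCat low_val high_val)
  (cats.zip (cats.drop 1)).all (fun p => decide (p.1 ≤ p.2))

-- ===== PRECONDITION & SPEC =====
def Spec_verify_partition (arr : List Int) (low_val : Int) (high_val : Int) (out : Bool) : Prop := out = verify_partition_alt arr low_val high_val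
instance (arr : List Int) (low_val : Int) (high_val : Int) (out : Bool) : Decidable (Spec_verify_partition arr low_val high_val out) := by unfold Spec_verify_partition; infer_instance

-- ===== CLAIM (what is proved, stated in full; the proofs are below) =====
def Claim_equal_verify_partition : Prop := ∀ (arr : List Int) (low_val : Int) (high_val : Int), Dom_verify_partition arr low_val high_val → Spec_verify_partition arr low_val high_val (verify_partition arr low_val high_val)

-- ===== LEMMAS AND PROOFS =====
-- chain check: categories of the list are ≥ m and non-decreasing
def pvChain (low_val high_val : Int) : Int → List Int → Bool
  | _, [] => true
  | m, x :: xs =>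
    let c := pvCat low_val high_val x
    if c < m then false else pvChain low_val high_val c xs

theorem pvLoopA_eq_chain (lo hi : Int) :
    ∀ (l : List Int) (sl sr sg : Bool),
      pvLoopA lo hi l sl sr sg = pvChain lo hi (if sg then 2 else if sr then 1 else 0) l := by
  intro l
  induction l with
  | nil => intro sl sr sg; cases sr <;> cases sg <;> rfl
  | cons x xs ih =>
    intro sl sr sg
    by_cases h1 : x < lo
    · cases sr <;> cases sg <;>
        simp [pvLoopA, pvChain, pvCat, h1, ih]
    · by_cases h2 : x ≤ hi
      · cases sr <;> cases sg <;>
          simp [pvLoopA, pvChain, pvCat, h1, h2, le_of_not_gt h1, ih]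
      · cases sr <;> cases sg <;>
          simp [pvLoopA, pvChain, pvCat, h1, h2, ih]

theorem pvChain_eq_zip (lo hi : Int) :
    ∀ (xs : List Int) (c : Int),
      pvChain lo hi c xs =
        (((c :: xs.map (pvCat lo hi)).zip ((c :: xs.map (pvCat lo hi)).drop 1)).all
          (fun p => decide (p.1 ≤ p.2))) := by
  intro xs
  induction xs with
  | nil => intro c; rfl
  | cons x xs ih =>
    intro c
    by_cases h : pvCat lo hi x < c
    · simp [pvChain, h]
    · simp [pvChain, h, ih (pvCat lo hi x)]
      omega

-- ===== VERDICT (by name: the statement is the Claim_ definition above) =====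
theorem verify_partition_spec : Claim_equal_verify_partition := by
  intro arr lo hi _
  unfold Spec_verify_partition verify_partition verify_partition_alt
  rw [pvLoopA_eq_chain]
  cases arr with
  | nil => rfl
  | cons x xs =>
    have h0 : ¬ pvCat lo hi x < 0 := by unfold pvCat; split_ifs <;> omega
    simp only [List.map, Bool.false_eq_true, if_false]
    simp only [pvChain, h0, if_false]
    rw [pvChain_eq_zip]
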